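-- pv_equiv track=rewrite | github.com/zhangbiby/stock-hot-tracker | backtest.py | _group_signals_by_date
-- ===== SOURCE A (Python) =====
-- from typing import List, Dict, Optional
--
-- def _group_signals_by_date(signals: List[Dict]) -> Dict[str, List[Dict]]:
--     """按日期分组信号"""
--     grouped = {}
--     for signal in signals:
--         date = signal.get('timestamp', '')[:10]
--         if date not in grouped:
--             grouped[date] = []
--         grouped[date].append(signal)
--     return grouped
-- ===== SOURCE B (Python) =====
-- def _group_signals_by_date(signals):
--     """按日期分组信号"""
--     def key(s):
--         return s.get('timestamp', '')[:10]
--     return {d: [s for s in signals if key(s) == d]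
--             for d in dict.fromkeys(key(s) for s in signals)}
-- ===== Notes on version B (the rewrite author's own statement) =====
-- stated objective: alternative
-- what changed: B first collects the distinct date keys in first-seen order with dict.fromkeys and then builds each group by filtering the whole signal list per key, instead of A's single pass that mutates a dict bucket per signal.
import Mathlib
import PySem

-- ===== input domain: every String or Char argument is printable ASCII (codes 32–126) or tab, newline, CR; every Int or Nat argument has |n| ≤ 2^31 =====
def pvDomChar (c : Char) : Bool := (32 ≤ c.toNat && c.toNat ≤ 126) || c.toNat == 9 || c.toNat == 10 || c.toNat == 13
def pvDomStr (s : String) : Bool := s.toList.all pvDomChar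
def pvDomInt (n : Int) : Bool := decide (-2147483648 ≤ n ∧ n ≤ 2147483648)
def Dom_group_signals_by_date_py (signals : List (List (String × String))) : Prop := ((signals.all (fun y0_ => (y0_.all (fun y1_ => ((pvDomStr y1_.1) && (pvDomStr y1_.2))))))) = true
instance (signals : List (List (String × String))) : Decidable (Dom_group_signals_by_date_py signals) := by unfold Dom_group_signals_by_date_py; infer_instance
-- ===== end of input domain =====

-- B groups by first collecting the distinct date keys (dict.fromkeys) and then filtering the
-- whole list once per key, instead of A's single pass mutating a bucket per signal (alternative).

-- shared key computation: signal.get('timestamp', '')[:10]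
def pvDateKey (s : List (String × String)) : String :=
  PySem.Str.slice ((PySem.Dict.mk s).getD "timestamp" "") none (some 10)

-- ===== PORT A =====
def group_signals_by_date_py (signals : List (List (String × String))) : List (String × List (List (String × String))) :=
  (signals.foldl
    (fun grouped signal =>
      let date := pvDateKey signal
      let grouped := if grouped.contains date then grouped
                     else grouped.insert date ([] : List (List (String × String)))
      grouped.modify date [] (fun l => l ++ [signal]))
    PySem.Dict.empty).items

-- ===== PORT B =====
def group_signals_by_date_py_alt (signals : List (List (String × String))) : List (String × List (List (String × String))) :=
  (PySem.List.dedup (signals.map pvDateKey)).map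
    (fun d => (d, signals.filter (fun s => pvDateKey s == d)))

-- ===== PRECONDITION & SPEC =====
def Spec_group_signals_by_date_py (signals : List (List (String × String))) (out : List (String × List (List (String × String)))) : Prop := out = group_signals_by_date_py_alt signals
instance (signals : List (List (String × String))) (out : List (String × List (List (String × String)))) : Decidable (Spec_group_signals_by_date_py signals out) := by unfold Spec_group_signals_by_date_py; infer_instance

-- ===== CLAIM (what is proved, stated in full; the proofs are below) =====
def Claim_equal_group_signals_by_date_py : Prop := ∀ (signals : List (List (String × String))), Dom_group_signals_by_date_py signals → Spec_group_signals_by_date_py signals (group_signals_by_date_py signals)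

-- ===== LEMMAS AND PROOFS =====

-- A's loop body ("insert empty bucket if new, then append") is a single modify
theorem pv_step_eq_modify (d : PySem.Dict String (List (List (String × String)))) (k : String)
    (f : List (List (String × String)) → List (List (String × String))) :
    (if d.contains k then d else d.insert k []).modify k [] f = d.modify k [] f := by
  by_cases h : d.contains k = true
  · simp [h]
  · simp only [h, Bool.false_eq_true, if_false]
    simp only [PySem.Dict.modify, PySem.Dict.insert_insert_self, PySem.Dict.getD_insert_self,
      PySem.Dict.getD_of_not_contains d [] (by simpa using h)]

theorem pv_fold_eq (signals : List (List (String × String))) :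
    (signals.foldl
      (fun grouped signal =>
        let date := pvDateKey signal
        let grouped := if grouped.contains date then grouped
                       else grouped.insert date ([] : List (List (String × String)))
        grouped.modify date [] (fun l => l ++ [signal]))
      PySem.Dict.empty)
    = signals.foldl (fun g s => g.modify (pvDateKey s) [] (fun l => l ++ [s])) PySem.Dict.empty := by
  refine PySem.List.foldl_congr_mem signals _ _ _ ?_
  intro g s _
  exact pv_step_eq_modify g (pvDateKey s) _

theorem pv_main (signals : List (List (String × String))) :
    group_signals_by_date_py signals = group_signals_by_date_py_alt signals := by
  unfold group_signals_by_date_py group_signals_by_date_py_alt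
  rw [pv_fold_eq]
  set D := signals.foldl (fun g s => g.modify (pvDateKey s) [] (fun l => l ++ [s])) PySem.Dict.empty with hD
  have hkeys : D.keys = PySem.List.dedup (signals.map pvDateKey) := by
    rw [hD, PySem.Dict.keys_foldl_modify_key signals pvDateKey [] (fun _ s l => l ++ [s])]
    simp [PySem.Dict.keys_empty]
    rfl
  have hnd : D.keys.Nodup := by
    rw [hD]
    exact PySem.Dict.nodup_keys_foldl_modify_key signals pvDateKey [] (fun _ s l => l ++ [s]) _ (by simp [PySem.Dict.keys_empty])
  have hget : ∀ c, D.getD c [] = signals.filter (fun s => pvDateKey s == c) := by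
    intro c
    rw [hD, show (signals.foldl (fun g s => g.modify (pvDateKey s) [] (fun l => l ++ [s])) PySem.Dict.empty)
        = ((signals.map (fun s => (pvDateKey s, s))).foldl
            (fun d p => d.modify p.1 [] (fun l => l ++ [p.2])) PySem.Dict.empty)
      from by rw [List.foldl_map],
      PySem.Dict.getD_foldl_modify_append]
    simp [List.filter_map, Function.comp_def]
  rw [PySem.Dict.items_eq_map_keys D hnd [], hkeys]
  exact List.map_congr_left (fun k _ => by rw [hget k])

-- ===== VERDICT (by name: the statement is the Claim_ definition above) =====
theorem group_signals_by_date_py_spec : Claim_equal_group_signals_by_date_py := by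
  intro signals _
  exact pv_main signals
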